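-- pv_equiv track=rewrite | github.com/MemMachine/MemMachine | src/memmachine/retrieval_agent/agents/coq_agent.py | _last_brace_block
-- ===== SOURCE A (Python) =====
-- def _last_brace_block(text: str) -> str | None:
--     end = text.rfind("}")
--     if end == -1:
--         return None
--
--     depth = 0
--     for i in range(end, -1, -1):
--         ch = text[i]
--         if ch == "}":
--             depth += 1
--         elif ch == "{":
--             depth -= 1
--             if depth == 0:
--                 return text[i:end + 1]
--     return None
-- ===== SOURCE B (Python) =====
-- def _last_brace_block(text: str) -> str | None:
--     end = text.rfind("}")
--     if end == -1:
--         return None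
--     stack = []
--     for i, ch in enumerate(text[:end]):
--         if ch == "{":
--             stack.append(i)
--         elif ch == "}":
--             if stack:
--                 stack.pop()
--     if not stack:
--         return None
--     return text[stack[-1]:end + 1]
-- ===== Notes on version B (the rewrite author's own statement) =====
-- stated objective: alternative
-- what changed: A scans backward from the last closing brace with a depth counter; B scans the prefix forward once, maintaining a stack of unmatched opening-brace indices (pops on an empty stack ignored) and slices from the stack top to the last closing brace.
import Mathlib
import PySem

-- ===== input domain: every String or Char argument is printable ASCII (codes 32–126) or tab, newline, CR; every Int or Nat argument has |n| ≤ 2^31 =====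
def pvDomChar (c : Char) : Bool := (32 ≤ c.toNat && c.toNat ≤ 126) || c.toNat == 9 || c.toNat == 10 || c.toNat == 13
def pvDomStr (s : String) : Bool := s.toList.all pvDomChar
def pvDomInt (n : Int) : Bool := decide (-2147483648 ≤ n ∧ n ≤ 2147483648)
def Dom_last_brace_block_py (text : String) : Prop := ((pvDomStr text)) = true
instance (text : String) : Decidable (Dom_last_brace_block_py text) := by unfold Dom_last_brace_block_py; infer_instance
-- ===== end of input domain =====

-- B replaces A's backward depth-counting scan from the last '}' by a single forward
-- scan keeping a stack of unmatched '{' indices (alternative decomposition, same cost).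

-- ===== PORT A =====
-- loop 'for i in range(end, -1, -1)' with early return text[i:end+1];
-- PySem.Str.pyGet? none = IndexError, unreachable here since every i is in range.
def lastBraceLoopA (text : String) (endI : Int) (idxs : List Int) (depth : Int) : Option String :=
  match idxs with
  | [] => none
  | i :: rest =>
    match PySem.Str.pyGet? text i with
    | none => none
    | some ch =>
      if ch = '}' then lastBraceLoopA text endI rest (depth + 1)
      else if ch = '{' then
        if depth - 1 = 0 then some (PySem.Str.slice text (some i) (some (endI + 1)))
        else lastBraceLoopA text endI rest (depth - 1)
      else lastBraceLoopA text endI rest depth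

def last_brace_block_py (text : String) : Option String :=
  let endI := PySem.Str.rfind text "}"
  if endI = -1 then none
  else lastBraceLoopA text endI (PySem.List.pyRange endI (-1) (-1)) 0

-- ===== PORT B =====
-- one forward step of Source B's loop: push index on '{', pop on '}' (pop of empty stack ignored)
def lastBraceStep (stack : List Int) (p : Int × Char) : List Int :=
  if p.2 = '{' then p.1 :: stack
  else if p.2 = '}' then stack.tail
  else stack

def last_brace_block_py_alt (text : String) : Option String :=
  let endI := PySem.Str.rfind text "}"
  if endI = -1 then none
  else
    let stack := (PySem.List.enumerate (PySem.Str.slice text none (some endI)).toList 0).foldl lastBraceStep []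
    match stack with
    | [] => none
    | top :: _ => some (PySem.Str.slice text (some top) (some (endI + 1)))

-- ===== PRECONDITION & SPEC =====
def Spec_last_brace_block_py (text : String) (out : Option String) : Prop := out = last_brace_block_py_alt text
instance (text : String) (out : Option String) : Decidable (Spec_last_brace_block_py text out) := by unfold Spec_last_brace_block_py; infer_instance

-- ===== CLAIM (what is proved, stated in full; the proofs are below) =====
def Claim_equal_last_brace_block_py : Prop := ∀ (text : String), Dom_last_brace_block_py text → Spec_last_brace_block_py text (last_brace_block_py text)

-- ===== LEMMAS AND PROOFS =====

-- proof-side core of A's loop, returning the index of the found '{'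
def auxA : List (Int × Char) → Int → Option Int
  | [], _ => none
  | (i, ch) :: t, d =>
    if ch = '}' then auxA t (d + 1)
    else if ch = '{' then (if d - 1 = 0 then some i else auxA t (d - 1))
    else auxA t d

-- rfind with a single-character needle returns -1 or a valid index holding that character
theorem rfind_go_char (s : List Char) (c : Char) (j : Nat) :
    PySem.Chars.rfind.go s [c] j = -1 ∨
      ∃ k : Nat, PySem.Chars.rfind.go s [c] j = (k : Int) ∧ s[k]? = some c := by
  induction j with
  | zero =>
    by_cases h : [c].isPrefixOf s
    · right
      refine ⟨0, ?_, ?_⟩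
      · simp [PySem.Chars.rfind.go, h]
      · cases s with
        | nil => simp [List.isPrefixOf] at h
        | cons a t =>
          simp [List.isPrefixOf] at h
          simp [h]
    · left; simp [PySem.Chars.rfind.go, h]
  | succ j ih =>
    by_cases h : [c].isPrefixOf (List.drop (j + 1) s)
    · right
      refine ⟨j + 1, ?_, ?_⟩
      · simp [PySem.Chars.rfind.go, h]
      · have hp : [c] <+: List.drop (j + 1) s := List.isPrefixOf_iff_prefix.mp h
        rcases hp with ⟨t, ht⟩
        have : (List.drop (j + 1) s)[0]? = some c := by rw [← ht]; rfl
        simpa [List.getElem?_drop] using this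
    · have : PySem.Chars.rfind.go s [c] (j + 1) = PySem.Chars.rfind.go s [c] j := by
        simp [PySem.Chars.rfind.go, h]
      rw [this]; exact ih

-- bridge: A's backward scan with depth d reads off the (d-1)-th element of B's forward stack
theorem auxA_eq_stack (m : List (Int × Char)) (d : Int) (hd : 1 ≤ d) :
    auxA m d = (m.reverse.foldl lastBraceStep [])[(d - 1).toNat]? := by
  induction m generalizing d with
  | nil => simp [auxA]
  | cons p t ih =>
    obtain ⟨i, ch⟩ := p
    have hfold : ((i, ch) :: t).reverse.foldl lastBraceStep []
        = lastBraceStep (t.reverse.foldl lastBraceStep []) (i, ch) := by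
      simp [List.foldl_append]
    rw [hfold]
    set S := t.reverse.foldl lastBraceStep [] with hS
    by_cases h1 : ch = '}'
    · subst h1
      have hL : auxA ((i, '}') :: t) d = auxA t (d + 1) := by simp [auxA]
      have hR : lastBraceStep S (i, '}') = S.tail := by simp [lastBraceStep]
      rw [hL, hR, ih (d + 1) (by omega), List.getElem?_tail]
      congr 1
      omega
    · by_cases h2 : ch = '{'
      · subst h2
        by_cases h3 : d - 1 = 0
        · have hL : auxA ((i, '{') :: t) d = some i := by simp [auxA, h3]
          rw [hL]
          simp [lastBraceStep, show (d - 1).toNat = 0 from by omega]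
        · have hL : auxA ((i, '{') :: t) d = auxA t (d - 1) := by simp [auxA, h3]
          have hR : lastBraceStep S (i, '{') = i :: S := by simp [lastBraceStep]
          rw [hL, hR, ih (d - 1) (by omega)]
          rw [show (d - 1).toNat = (d - 1 - 1).toNat + 1 from by omega]
          simp
      · have hL : auxA ((i, ch) :: t) d = auxA t d := by simp [auxA, h1, h2]
        have hR : lastBraceStep S (i, ch) = S := by simp [lastBraceStep, h1, h2]
        rw [hL, hR]
        exact ih d hd

-- splitting off the last enumerated character
theorem enum_take_succ (cs : List Char) (j : Nat) (hj : j < cs.length) :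
    PySem.List.enumerate (cs.take (j + 1)) 0
      = PySem.List.enumerate (cs.take j) 0 ++ [((j : Int), cs[j])] := by
  rw [List.take_add_one]
  rw [List.getElem?_eq_getElem hj]
  rw [PySem.List.enumerate_append]
  simp [List.length_take, Nat.min_eq_left (le_of_lt hj), PySem.List.enumerate_cons,
    PySem.List.enumerate_nil]

-- A's literal loop equals auxA over the reversed enumerated prefix, mapped through the slice
theorem loopA_eq_auxA (text : String) (endI : Int) (j : Nat) (d : Int)
    (hj : j ≤ text.toList.length) :
    lastBraceLoopA text endI (PySem.List.pyRange ((j : Int) - 1) (-1) (-1)) d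
      = (auxA (PySem.List.enumerate (text.toList.take j) 0).reverse d).map
          (fun i => PySem.Str.slice text (some i) (some (endI + 1))) := by
  induction j generalizing d with
  | zero =>
    rw [PySem.List.pyRange_neg_one_eq_nil (by omega)]
    simp [lastBraceLoopA, PySem.List.enumerate_nil, auxA]
  | succ j ih =>
    have hjlt : j < text.toList.length := by omega
    rw [show (((j + 1 : Nat) : Int) - 1) = (j : Int) from by push_cast; ring]
    rw [PySem.List.pyRange_neg_one_cons (show (-1 : Int) < (j : Int) by omega)]
    rw [enum_take_succ text.toList j hjlt, List.reverse_append]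
    simp only [List.reverse_singleton, List.singleton_append]
    set E := (PySem.List.enumerate (text.toList.take j) 0).reverse with hE
    by_cases h1 : text.toList[j] = '}'
    · have hL : lastBraceLoopA text endI ((j : Int) :: PySem.List.pyRange ((j : Int) - 1) (-1) (-1)) d
          = lastBraceLoopA text endI (PySem.List.pyRange ((j : Int) - 1) (-1) (-1)) (d + 1) := by
        simp [lastBraceLoopA, List.getElem?_eq_getElem hjlt, h1]
      have hR : auxA (((j : Int), text.toList[j]) :: E) d = auxA E (d + 1) := by
        simp [auxA, h1]
      rw [hL, hR]
      exact ih (d + 1) (by omega)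
    · by_cases h2 : text.toList[j] = '{'
      · by_cases h3 : d - 1 = 0
        · have hL : lastBraceLoopA text endI ((j : Int) :: PySem.List.pyRange ((j : Int) - 1) (-1) (-1)) d
              = some (PySem.Str.slice text (some ((j : Nat) : Int)) (some (endI + 1))) := by
            simp [lastBraceLoopA, List.getElem?_eq_getElem hjlt, h2, h3]
          have hR : auxA (((j : Int), text.toList[j]) :: E) d = some ((j : Nat) : Int) := by
            simp [auxA, h2, h3]
          rw [hL, hR]
          simp
        · have hL : lastBraceLoopA text endI ((j : Int) :: PySem.List.pyRange ((j : Int) - 1) (-1) (-1)) d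
              = lastBraceLoopA text endI (PySem.List.pyRange ((j : Int) - 1) (-1) (-1)) (d - 1) := by
            simp [lastBraceLoopA, List.getElem?_eq_getElem hjlt, h2, h3]
          have hR : auxA (((j : Int), text.toList[j]) :: E) d = auxA E (d - 1) := by
            simp [auxA, h2, h3]
          rw [hL, hR]
          exact ih (d - 1) (by omega)
      · have hL : lastBraceLoopA text endI ((j : Int) :: PySem.List.pyRange ((j : Int) - 1) (-1) (-1)) d
            = lastBraceLoopA text endI (PySem.List.pyRange ((j : Int) - 1) (-1) (-1)) d := by
          simp [lastBraceLoopA, List.getElem?_eq_getElem hjlt, h1, h2]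
        have hR : auxA (((j : Int), text.toList[j]) :: E) d = auxA E d := by
          simp [auxA, h1, h2]
        rw [hL, hR]
        exact ih d (by omega)

-- ===== VERDICT (by name: the statement is the Claim_ definition above) =====
theorem last_brace_block_py_spec : Claim_equal_last_brace_block_py := by
  intro text _
  unfold Spec_last_brace_block_py
  unfold last_brace_block_py last_brace_block_py_alt
  set endI := PySem.Str.rfind text "}" with hEnd
  by_cases hneg : endI = -1
  · simp [hneg]
  · simp only [hneg, if_false]
    -- endI is a valid index holding '}'
    have hgo := rfind_go_char text.toList '}' text.toList.length
    have hrw : endI = PySem.Chars.rfind.go text.toList ['}'] text.toList.length := by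
      rw [hEnd, PySem.Str.rfind_eq]; rfl
    rcases hgo with h | ⟨k, hk, hkc⟩
    · exact absurd (hrw.trans h) hneg
    · have hkend : endI = (k : Int) := hrw.trans hk
      obtain ⟨hklt, hkch⟩ := List.getElem?_eq_some_iff.mp hkc
      -- A's side via loopA_eq_auxA at j = k + 1
      have hA := loopA_eq_auxA text endI (k + 1) 0 (by omega)
      rw [show (((k + 1 : Nat) : Int) - 1) = endI from by rw [hkend]; push_cast; ring] at hA
      rw [hA]
      rw [enum_take_succ text.toList k hklt, List.reverse_append]
      simp only [List.reverse_singleton, List.singleton_append]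
      rw [show auxA (((k : Int), text.toList[k]) :: (PySem.List.enumerate (text.toList.take k) 0).reverse) 0
          = auxA (PySem.List.enumerate (text.toList.take k) 0).reverse (0 + 1) from by
        simp [auxA, hkch]]
      rw [auxA_eq_stack _ (0 + 1) (by omega)]
      rw [List.reverse_reverse]
      -- B's side: its enumerated slice is the same prefix
      have hslice : (PySem.Str.slice text none (some endI)).toList = text.toList.take k := by
        rw [PySem.Str.toList_slice, PySem.Chars.slice_eq_listSlice,
          PySem.List.slice_to text.toList (show (0 : Int) ≤ endI by omega)]
        rw [hkend]
        simp
      rw [hslice]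
      rcases hstack : (PySem.List.enumerate (List.take k text.toList) 0).foldl lastBraceStep [] with _ | ⟨top, rest⟩
      · simp
      · simp
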